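-- pv_equiv track=rewrite | github.com/J-Jaeh/algorithm | 프로그래머스/lv0/120848. 팩토리얼/팩토리얼.py | solution
-- ===== SOURCE A (Python) =====
-- def solution(n):
--     list_n =[]
--     for a in range(1,11):
--         list_n.append(fac(a))
--
--     count =0
--     for a in list_n:
--         if a<=n:
--             count+=1
--
--     return count
--
-- def fac(n):
--     if n>1:
--         return n*fac(n-1)
--     else:
--         return 1
-- ===== SOURCE B (Python) =====
-- def solution(n):
--     count = 0
--     f = 1
--     for a in range(1, 11):
--         f *= a
--         if f <= n:
--             count += 1
--     return count
-- ===== Notes on version B (the rewrite author's own statement) =====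
-- stated objective: simpler
-- what changed: Replaced the two-pass version (build a list of 10 independently recursively computed factorials, then count) with one fused loop maintaining a running factorial product and a counter.
import Mathlib
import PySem

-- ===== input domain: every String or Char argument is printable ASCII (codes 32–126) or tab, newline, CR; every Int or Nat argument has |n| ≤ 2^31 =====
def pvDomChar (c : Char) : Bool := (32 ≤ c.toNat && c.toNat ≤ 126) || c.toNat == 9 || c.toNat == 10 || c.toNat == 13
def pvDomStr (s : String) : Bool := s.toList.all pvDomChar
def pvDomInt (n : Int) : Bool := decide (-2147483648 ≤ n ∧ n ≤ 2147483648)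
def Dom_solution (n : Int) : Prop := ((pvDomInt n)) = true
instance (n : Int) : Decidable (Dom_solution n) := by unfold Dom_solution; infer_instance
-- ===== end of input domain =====

-- B fuses A's two passes (build list of recursively computed factorials, then count) into one loop
-- with a running factorial product and a counter; objective: simpler.


-- ===== PORT A =====
-- recursive helper fac, literal port of A's fac
def fac (n : Int) : Int :=
  if h : n > 1 then n * fac (n - 1) else 1
  termination_by n.toNat
  decreasing_by omega

def solution (n : Int) : Int :=
  let list_n := (PySem.List.pyRange 1 11 1).foldl (fun acc a => acc ++ [fac a]) []
  let count := list_n.foldl (fun count a => if a ≤ n then count + 1 else count) 0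
  count

-- ===== PORT B =====
def solution_alt (n : Int) : Int :=
  let st := (PySem.List.pyRange 1 11 1).foldl
    (fun (st : Int × Int) a =>
      let f := st.2 * a
      (if f ≤ n then st.1 + 1 else st.1, f))
    (0, 1)
  st.1

-- ===== PRECONDITION & SPEC =====
def Spec_solution (n : Int) (out : Int) : Prop := out = solution_alt n
instance (n : Int) (out : Int) : Decidable (Spec_solution n out) := by unfold Spec_solution; infer_instance

-- ===== CLAIM (what is proved, stated in full; the proofs are below) =====
def Claim_equal_solution : Prop := ∀ (n : Int), Dom_solution n → Spec_solution n (solution n)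

-- ===== LEMMAS AND PROOFS =====

-- ===== VERDICT (by name: the statement is the Claim_ definition above) =====
theorem solution_spec : Claim_equal_solution := by
  intro n _
  show solution n = solution_alt n
  have h1 : fac 1 = 1 := by rw [fac]; norm_num
  have h2 : fac 2 = 2 := by rw [fac]; norm_num [h1]
  have h3 : fac 3 = 6 := by rw [fac]; norm_num [h2]
  have h4 : fac 4 = 24 := by rw [fac]; norm_num [h3]
  have h5 : fac 5 = 120 := by rw [fac]; norm_num [h4]
  have h6 : fac 6 = 720 := by rw [fac]; norm_num [h5]
  have h7 : fac 7 = 5040 := by rw [fac]; norm_num [h6]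
  have h8 : fac 8 = 40320 := by rw [fac]; norm_num [h7]
  have h9 : fac 9 = 362880 := by rw [fac]; norm_num [h8]
  have h10 : fac 10 = 3628800 := by rw [fac]; norm_num [h9]
  have hr : PySem.List.pyRange 1 11 1 = [1,2,3,4,5,6,7,8,9,10] := by decide
  simp only [solution, solution_alt, hr, List.foldl]
  norm_num [h1, h2, h3, h4, h5, h6, h7, h8, h9, h10]
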